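-- pv_equiv track=rewrite | github.com/sethafancher/BrainGu_Toy_Problems | src/2021/may/codility/day3.py | solution
-- ===== SOURCE A (Python) =====
-- def solution(A):
--     nums = {}
--     for num in A:
--         nums[num] = 1
--     for num in nums:
--         if num + 1 in nums or num - 1 in nums:
--             return True
--     return False
-- ===== SOURCE B (Python) =====
-- def solution(A):
--     B = sorted(A)
--     return any(y - x == 1 for x, y in zip(B, B[1:]))
-- ===== Notes on version B (the rewrite author's own statement) =====
-- stated objective: alternative
-- what changed: Replaces the hash-dict build plus per-key num+1/num-1 membership scan with sorting the list and scanning adjacent pairs for a difference of exactly 1 (correct on integers: if a and a+1 both occur, only copies of a can sit between them in sorted order, so some adjacent pair differs by 1).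
import Mathlib
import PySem

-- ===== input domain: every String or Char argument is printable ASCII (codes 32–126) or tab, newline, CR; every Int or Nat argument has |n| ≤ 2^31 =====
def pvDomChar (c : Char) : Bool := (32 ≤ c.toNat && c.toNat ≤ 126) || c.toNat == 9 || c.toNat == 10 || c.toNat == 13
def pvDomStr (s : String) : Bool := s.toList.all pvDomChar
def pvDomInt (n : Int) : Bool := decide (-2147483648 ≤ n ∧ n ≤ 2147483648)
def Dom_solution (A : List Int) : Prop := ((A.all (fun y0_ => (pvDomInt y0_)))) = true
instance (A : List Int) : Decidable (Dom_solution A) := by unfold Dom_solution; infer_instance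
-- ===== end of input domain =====

-- B sorts the list and scans adjacent pairs for a difference of exactly 1, instead of A's
-- hash-dict build plus per-key num+1/num-1 membership scan (alternative algorithm, exact on integers).
-- ===== PORT A =====
def solution (A : List Int) : Bool :=
  let nums : PySem.Dict Int Int := A.foldl (fun d num => d.insert num 1) PySem.Dict.empty
  nums.keys.any (fun num => nums.contains (num + 1) || nums.contains (num - 1))

-- ===== PORT B =====
def solution_alt (A : List Int) : Bool :=
  let B := PySem.List.sorted A (fun x => x) false
  (B.zip (PySem.List.slice B (some ((1 : Nat) : Int)) none)).any (fun p => p.2 - p.1 == 1)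

-- ===== PRECONDITION & SPEC =====
def Spec_solution (A : List Int) (out : Bool) : Prop := out = solution_alt A
instance (A : List Int) (out : Bool) : Decidable (Spec_solution A out) := by unfold Spec_solution; infer_instance

-- ===== CLAIM (what is proved, stated in full; the proofs are below) =====
def Claim_equal_solution : Prop := ∀ (A : List Int), Dom_solution A → Spec_solution A (solution A)

-- ===== LEMMAS AND PROOFS =====

lemma solution_iff (A : List Int) :
    solution A = true ↔ ∃ num ∈ A, (num + 1 ∈ A ∨ num - 1 ∈ A) := by
  simp only [solution, List.any_eq_true, Bool.or_eq_true,
    PySem.Dict.keys_foldl_insert, PySem.Dict.keys_empty,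
    PySem.Dict.contains_eq_decide_mem_keys, decide_eq_true_eq,
    PySem.Set.mem_update, List.not_mem_nil, false_or]

-- adjacent-pair scan on a sorted list detects exactly 'some a and a+1 both occur'
lemma adj_iff : ∀ (B : List Int), B.Pairwise (· ≤ ·) →
    ((B.zip (B.drop 1)).any (fun p => p.2 - p.1 == 1) = true ↔ ∃ a ∈ B, a + 1 ∈ B) := by
  intro B
  induction B with
  | nil => simp
  | cons x t ih =>
    intro hp
    cases t with
    | nil => simp
    | cons y t' =>
      rcases List.pairwise_cons.1 hp with ⟨hx, hp'⟩
      have hy : ∀ b ∈ t', y ≤ b := (List.pairwise_cons.1 hp').1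
      have hxy : x ≤ y := hx y (by simp)
      by_cases h1 : y - x = 1
      · constructor
        · intro _
          exact ⟨x, by simp, by rw [show x + 1 = y by omega]; simp⟩
        · intro _
          simp [h1]
      · have ihs := ih hp'
        simp only [List.drop_one, List.tail_cons] at ihs ⊢
        simp only [List.zip_cons_cons, List.any_cons, Bool.or_eq_true, beq_iff_eq]
        constructor
        · rintro (h | h)
          · exact absurd h h1
          · rcases ihs.1 h with ⟨a, ha, ha1⟩
            exact ⟨a, List.mem_cons_of_mem _ ha, List.mem_cons_of_mem _ ha1⟩
        · rintro ⟨a, ha, ha1⟩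
          right
          apply ihs.2
          have hxa : x ≤ a := by
            rcases List.mem_cons.1 ha with rfl | h
            · exact le_refl _
            · exact hx a h
          have ha1' : a + 1 ∈ y :: t' := by
            rcases List.mem_cons.1 ha1 with h | h
            · omega
            · exact h
          have ha' : a ∈ y :: t' := by
            rcases List.mem_cons.1 ha with h | h
            · -- a = x; then y = a since y ≤ a+1 (min of tail) and a ≤ y, y ≠ a+1
              subst h
              have hya1 : y ≤ a + 1 := by
                rcases List.mem_cons.1 ha1' with h2 | h2
                · omega
                · exact hy _ h2
              have : y = a := by
                rcases List.mem_cons.1 ha1' with h2 | h2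
                · omega
                · omega
              simp [this]
            · exact h
          exact ⟨a, ha', ha1'⟩

lemma solution_alt_iff (A : List Int) :
    solution_alt A = true ↔ ∃ a ∈ A, a + 1 ∈ A := by
  simp only [solution_alt, PySem.List.slice_from_natCast]
  rw [adj_iff _ (by simpa using PySem.List.sorted_pairwise A (fun x => x) )]
  simp [PySem.List.mem_sorted]

theorem solution_spec : Claim_equal_solution := by
  intro A _
  unfold Spec_solution
  rw [Bool.eq_iff_iff, solution_iff, solution_alt_iff]
  constructor
  · rintro ⟨n, hn, h | h⟩
    · exact ⟨n, hn, h⟩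
    · exact ⟨n - 1, h, by rw [show n - 1 + 1 = n by ring]; exact hn⟩
  · rintro ⟨a, ha, ha1⟩
    exact ⟨a, ha, Or.inl ha1⟩
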